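-- pv_equiv track=rewrite | github.com/SauravSinghChandel/leetcode-solutions | medium/3723.py | maxSumOfSquares
-- ===== SOURCE A (Python) =====
-- def maxSumOfSquares(num: int, sum: int) -> str:
--     if num * 9 < sum:
--         return ""
--
--     res = ["0"] * num
--     i = 0
--     while sum > 0:
--         if sum >= 9:
--             res[i] = "9"
--         else:
--             res[i] = str(sum)
--         i+= 1
--         sum -= 9
--
--     return "".join(res)
-- ===== SOURCE B (Python) =====
-- def maxSumOfSquares(num: int, sum: int) -> str:
--     if num * 9 < sum:
--         return ""
--     if sum <= 0:
--         return "0" * num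
--     q, r = divmod(sum, 9)
--     tail = str(r) if r else ""
--     return "9" * q + tail + "0" * (num - q - len(tail))
-- ===== Notes on version B (the rewrite author's own statement) =====
-- stated objective: simpler
-- what changed: Replaces the per-position while loop and mutable list with a closed-form divmod(sum, 9) string assembly ('9'*q + optional remainder digit + '0' padding).
import Mathlib
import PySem

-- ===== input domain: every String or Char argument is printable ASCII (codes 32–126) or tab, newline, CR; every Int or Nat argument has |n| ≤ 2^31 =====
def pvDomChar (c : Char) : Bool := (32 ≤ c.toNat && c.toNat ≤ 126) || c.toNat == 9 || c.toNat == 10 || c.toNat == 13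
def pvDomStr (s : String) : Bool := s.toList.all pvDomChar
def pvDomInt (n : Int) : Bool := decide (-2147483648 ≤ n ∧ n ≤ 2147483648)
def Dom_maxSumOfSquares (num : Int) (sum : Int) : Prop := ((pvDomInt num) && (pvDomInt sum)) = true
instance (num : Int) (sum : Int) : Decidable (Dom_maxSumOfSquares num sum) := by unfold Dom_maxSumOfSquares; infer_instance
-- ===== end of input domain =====

-- B replaces A's per-position while loop with a closed-form divmod(sum, 9) string assembly (simpler).

-- ===== PORT A =====
-- the while loop: res[i] = "9" / str(sum); i += 1; sum -= 9.  Each written entry is one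
-- digit, so res is modelled as List Char.  List.set is a no-op out of range; the loop's
-- index is always in range when A is called (num*9 ≥ sum), so this is exact.
def pvALoop (res : List Char) (i : Nat) (sum : Int) : List Char :=
  if h : sum > 0 then
    let c : Char := if sum ≥ 9 then '9' else Char.ofNat (48 + sum.toNat)
    pvALoop (res.set i c) (i + 1) (sum - 9)
  else res
termination_by sum.toNat
decreasing_by omega

def maxSumOfSquares (num : Int) (sum : Int) : String :=
  if num * 9 < sum then ""
  else String.ofList (pvALoop (List.replicate num.toNat '0') 0 sum)

-- ===== PORT B =====
def maxSumOfSquares_alt (num : Int) (sum : Int) : String :=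
  if num * 9 < sum then ""
  else if sum ≤ 0 then String.ofList (List.replicate num.toNat '0')
  else
    let q := PySem.Int.floordiv sum 9
    let r := PySem.Int.mod sum 9
    let tail : List Char := if r ≠ 0 then [Char.ofNat (48 + r.toNat)] else []
    String.ofList (List.replicate q.toNat '9' ++ tail ++
               List.replicate (num - q - tail.length).toNat '0')

-- ===== PRECONDITION & SPEC =====
def Spec_maxSumOfSquares (num : Int) (sum : Int) (out : String) : Prop := out = maxSumOfSquares_alt num sum
instance (num : Int) (sum : Int) (out : String) : Decidable (Spec_maxSumOfSquares num sum out) := by unfold Spec_maxSumOfSquares; infer_instance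

-- ===== CLAIM (what is proved, stated in full; the proofs are below) =====
def Claim_equal_maxSumOfSquares : Prop := ∀ (num : Int) (sum : Int), Dom_maxSumOfSquares num sum → Spec_maxSumOfSquares num sum (maxSumOfSquares num sum)

-- ===== LEMMAS AND PROOFS =====

-- closed form of the loop: writing over a pure-zero suffix starting at index pre.length
theorem pvALoop_closed (fuel : Nat) : ∀ (sum : Int) (pre : List Char) (m : Nat),
    sum.toNat ≤ fuel → 0 < sum → sum ≤ 9 * (m : Int) →
    pvALoop (pre ++ List.replicate m '0') pre.length sum
      = pre ++ List.replicate (PySem.Int.floordiv sum 9).toNat '9'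
            ++ (if PySem.Int.mod sum 9 ≠ 0 then [Char.ofNat (48 + (PySem.Int.mod sum 9).toNat)] else [])
            ++ List.replicate (m - (PySem.Int.floordiv sum 9).toNat
                  - (if PySem.Int.mod sum 9 ≠ 0 then 1 else 0)) '0' := by
  induction fuel with
  | zero => intro sum pre m hf hs _; omega
  | succ f ih =>
    intro sum pre m hf hs hm
    have hq : PySem.Int.floordiv sum 9 = sum / 9 := PySem.Int.floordiv_eq_ediv_of_pos (by omega)
    have hr : PySem.Int.mod sum 9 = sum % 9 := PySem.Int.mod_eq_emod_of_pos (by omega)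
    have hmpos : 0 < m := by
      rcases Nat.eq_zero_or_pos m with h | h
      · subst h; omega
      · exact h
    obtain ⟨m', rfl⟩ : ∃ m', m = m' + 1 := ⟨m - 1, by omega⟩
    have hrep : List.replicate (m' + 1) '0' = '0' :: List.replicate m' '0' := rfl
    rw [pvALoop, dif_pos hs]
    have hset : ∀ c : Char, (pre ++ List.replicate (m' + 1) '0').set pre.length c
        = (pre ++ [c]) ++ List.replicate m' '0' := by
      intro c
      rw [hrep, List.set_append_right _ _ (le_refl _)]
      simp
    by_cases h9 : sum ≥ 9
    · simp only [if_pos h9, hset]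
      by_cases hz : sum - 9 > 0
      · have := ih (sum - 9) (pre ++ ['9']) m' (by omega) hz (by omega)
        rw [List.length_append] at this
        simp only [List.length_singleton] at this
        rw [this]
        have hq' : PySem.Int.floordiv (sum - 9) 9 = (sum - 9) / 9 :=
          PySem.Int.floordiv_eq_ediv_of_pos (by omega)
        have hr' : PySem.Int.mod (sum - 9) 9 = (sum - 9) % 9 :=
          PySem.Int.mod_eq_emod_of_pos (by omega)
        have hqe : (sum - 9) / 9 = sum / 9 - 1 := by omega
        have hre : (sum - 9) % 9 = sum % 9 := by omega
        have hq1 : 1 ≤ sum / 9 := by omega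
        rw [hq', hr', hqe, hre, hq, hr]
        have hrepq : List.replicate (sum / 9).toNat '9'
            = '9' :: List.replicate (sum / 9 - 1).toNat '9' := by
          have : (sum / 9).toNat = (sum / 9 - 1).toNat + 1 := by omega
          rw [this]; rfl
        rw [hrepq]
        have : m' - (sum / 9 - 1).toNat - (if sum % 9 ≠ 0 then 1 else 0)
             = m' + 1 - (sum / 9).toNat - (if sum % 9 ≠ 0 then 1 else 0) := by
          split <;> omega
        rw [this]; simp
      · -- sum = 9 exactly
        have hsum9 : sum = 9 := by omega
        subst hsum9
        rw [pvALoop, dif_neg (by omega)]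
        rw [hq, hr]
        norm_num [List.replicate]
    · -- 0 < sum < 9 : one more write, then the loop stops
      simp only [if_neg h9, hset]
      rw [pvALoop, dif_neg (by omega)]
      rw [hq, hr]
      have hqe : sum / 9 = 0 := by omega
      have hre : sum % 9 = sum := by omega
      rw [hqe, hre]
      have hrne : sum ≠ 0 := by omega
      simp [hrne]

theorem maxSumOfSquares_eq (num : Int) (sum : Int) :
    maxSumOfSquares num sum = maxSumOfSquares_alt num sum := by
  unfold maxSumOfSquares maxSumOfSquares_alt
  by_cases h1 : num * 9 < sum
  · simp [h1]
  · simp only [if_neg h1]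
    by_cases h2 : sum ≤ 0
    · rw [if_pos h2, pvALoop, dif_neg (by omega)]
    · rw [if_neg h2]
      have hs : 0 < sum := by omega
      have hnum : 0 < num := by nlinarith
      have hm : sum ≤ 9 * ((num.toNat : Nat) : Int) := by omega
      have := pvALoop_closed sum.toNat sum [] num.toNat (le_refl _) hs hm
      simp only [List.nil_append, List.length_nil] at this
      rw [this]
      have hq : PySem.Int.floordiv sum 9 = sum / 9 := PySem.Int.floordiv_eq_ediv_of_pos (by omega)
      have hr : PySem.Int.mod sum 9 = sum % 9 := PySem.Int.mod_eq_emod_of_pos (by omega)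
      simp only [hq, hr]
      by_cases hrz : sum % 9 = 0
      · simp only [hrz, ne_eq, not_true_eq_false, if_false, List.append_nil, List.length_nil]
        have hle : sum ≤ num * 9 := not_lt.mp h1
        congr 2
        congr 1
        omega
      · simp only [ne_eq, hrz, not_false_eq_true, if_true, List.length_singleton]
        have hle : sum ≤ num * 9 := not_lt.mp h1
        congr 3
        omega

-- ===== VERDICT (by name: the statement is the Claim_ definition above) =====
theorem maxSumOfSquares_spec : Claim_equal_maxSumOfSquares := by
  intro num sum _
  unfold Spec_maxSumOfSquares
  exact maxSumOfSquares_eq num sum
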